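-- pv_equiv track=rewrite | github.com/geetickachauhan/relation-extraction | relation_extraction/data/converters/converter_ddi.py | get_entity_start_and_end
-- ===== SOURCE A (Python) =====
-- def get_entity_start_and_end(entity_start, entity_end, tokens):
--     e_start = tokens.index(entity_start)
--     e_end = tokens.index(entity_end) - 2 # because 2 tags will be eliminated
--     # only eliminate the entity_start and entity_end once because DRUGUNRELATEDSTART will get
--     # eliminated many times
--     new_tokens = []
--     entity_start_seen = 0
--     entity_end_seen = 0
--     for x in tokens:
--         if x == entity_start:
--             entity_start_seen += 1
--         if x == entity_end:
--             entity_end_seen += 1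
--         if x == entity_start and entity_start_seen == 1:
--             continue
--         if x == entity_end and entity_end_seen == 1:
--             continue
--         new_tokens.append(x)
--     return (e_start, e_end), new_tokens
-- ===== SOURCE B (Python) =====
-- def get_entity_start_and_end(entity_start, entity_end, tokens):
--     e_start = tokens.index(entity_start)
--     e_end = tokens.index(entity_end) - 2  # 2 tags will be eliminated
--     new_tokens = list(tokens)
--     new_tokens.remove(entity_start)
--     if entity_end != entity_start:
--         new_tokens.remove(entity_end)
--     return (e_start, e_end), new_tokens
-- ===== Notes on version B (the rewrite author's own statement) =====
-- stated objective: simpler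
-- what changed: B drops the one-pass loop with two occurrence counters and instead removes each tag's first occurrence directly with list.remove (once only when the two tags coincide).
import Mathlib
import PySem

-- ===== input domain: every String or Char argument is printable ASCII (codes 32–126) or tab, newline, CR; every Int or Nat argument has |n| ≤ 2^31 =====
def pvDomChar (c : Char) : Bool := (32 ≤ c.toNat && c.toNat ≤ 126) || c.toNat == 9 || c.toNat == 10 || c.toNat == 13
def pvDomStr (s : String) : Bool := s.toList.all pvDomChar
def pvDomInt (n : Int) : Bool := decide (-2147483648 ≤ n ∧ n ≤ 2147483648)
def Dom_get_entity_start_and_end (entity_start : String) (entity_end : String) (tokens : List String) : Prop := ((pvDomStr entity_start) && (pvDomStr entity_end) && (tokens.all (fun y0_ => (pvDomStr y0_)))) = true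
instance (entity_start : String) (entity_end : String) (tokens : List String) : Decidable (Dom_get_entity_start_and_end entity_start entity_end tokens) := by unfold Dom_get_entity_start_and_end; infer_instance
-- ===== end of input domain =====

-- ===== PORT A =====
-- B removes each tag's first occurrence directly instead of A's counter-tracking pass (same cost, simpler).
-- A's for-loop over tokens with the two seen-counters, as structural recursion over the same state.
def pvLoopA (es ee : String) : List String → Nat → Nat → List String
  | [], _, _ => []
  | x :: xs, cs, ce =>
    let cs' := if x = es then cs + 1 else cs
    let ce' := if x = ee then ce + 1 else ce
    if x = es ∧ cs' = 1 then pvLoopA es ee xs cs' ce'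
    else if x = ee ∧ ce' = 1 then pvLoopA es ee xs cs' ce'
    else x :: pvLoopA es ee xs cs' ce'

def get_entity_start_and_end (entity_start : String) (entity_end : String) (tokens : List String) : (Int × Int) × List String :=
  match PySem.List.index? tokens entity_start, PySem.List.index? tokens entity_end with
  | some i, some j => (((i : Int), (j : Int) - 2), pvLoopA entity_start entity_end tokens 0 0)
  | _, _ => ((0, 0), [])  -- ValueError from .index: excluded by Pre_

-- ===== PORT B =====
def get_entity_start_and_end_alt (entity_start : String) (entity_end : String) (tokens : List String) : (Int × Int) × List String :=
  match PySem.List.index? tokens entity_start with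
  | none => ((0, 0), [])  -- ValueError from .index: excluded by Pre_
  | some i =>
  match PySem.List.index? tokens entity_end with
  | none => ((0, 0), [])  -- ValueError from .index: excluded by Pre_
  | some j =>
    match PySem.List.remove? tokens entity_start with
    | some t1 =>
      if entity_end ≠ entity_start then
        match PySem.List.remove? t1 entity_end with
        | some t2 => (((i : Int), (j : Int) - 2), t2)
        | none => ((0, 0), [])  -- ValueError: excluded by Pre_
      else (((i : Int), (j : Int) - 2), t1)
    | none => ((0, 0), [])  -- ValueError: excluded by Pre_

-- ===== PRECONDITION & SPEC =====
-- Pre_ excludes exactly the inputs where a tag is absent from tokens: both A and B raise ValueError there.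
def Pre_get_entity_start_and_end (entity_start : String) (entity_end : String) (tokens : List String) : Prop :=
  entity_start ∈ tokens ∧ entity_end ∈ tokens
instance (entity_start : String) (entity_end : String) (tokens : List String) : Decidable (Pre_get_entity_start_and_end entity_start entity_end tokens) := by unfold Pre_get_entity_start_and_end; infer_instance

def pvWitness_get_entity_start_and_end : String × String × List String := ("S", "E", ["S", "a", "E", "S", "E"])

def Spec_get_entity_start_and_end (entity_start : String) (entity_end : String) (tokens : List String) (out : (Int × Int) × List String) : Prop := out = get_entity_start_and_end_alt entity_start entity_end tokens
instance (entity_start : String) (entity_end : String) (tokens : List String) (out : (Int × Int) × List String) : Decidable (Spec_get_entity_start_and_end entity_start entity_end tokens out) := by unfold Spec_get_entity_start_and_end; infer_instance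

-- ===== CLAIM (what is proved, stated in full; the proofs are below) =====
def Claim_equal_get_entity_start_and_end : Prop := ∀ (entity_start : String) (entity_end : String) (tokens : List String), Dom_get_entity_start_and_end entity_start entity_end tokens → Pre_get_entity_start_and_end entity_start entity_end tokens → Spec_get_entity_start_and_end entity_start entity_end tokens (get_entity_start_and_end entity_start entity_end tokens)

-- ===== LEMMAS AND PROOFS =====
-- Once both tags have been seen, the loop copies the rest unchanged.
theorem pvLoopA_both (es ee : String) : ∀ (xs : List String) (cs ce : Nat), 1 ≤ cs → 1 ≤ ce → pvLoopA es ee xs cs ce = xs := by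
  intro xs
  induction xs with
  | nil => intro cs ce _ _; rfl
  | cons x xs ih =>
    intro cs ce hcs hce
    simp only [pvLoopA]
    have h1 : ¬(x = es ∧ (if x = es then cs + 1 else cs) = 1) := by
      rintro ⟨rfl, h⟩; simp at h; omega
    have h2 : ¬(x = ee ∧ (if x = ee then ce + 1 else ce) = 1) := by
      rintro ⟨rfl, h⟩; simp at h; omega
    rw [if_neg h1, if_neg h2, ih]
    · split <;> omega
    · split <;> omega

-- Start tag already seen, end tag not: the loop erases the first occurrence of the end tag.
theorem pvLoopA_cs (es ee : String) : ∀ (xs : List String) (cs : Nat), 1 ≤ cs → pvLoopA es ee xs cs 0 = xs.erase ee := by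
  intro xs
  induction xs with
  | nil => intro cs _; rfl
  | cons x xs ih =>
    intro cs hcs
    simp only [pvLoopA]
    have h1 : ¬(x = es ∧ (if x = es then cs + 1 else cs) = 1) := by
      rintro ⟨rfl, h⟩; simp at h; omega
    rw [if_neg h1]
    by_cases hy : x = ee
    · rw [if_pos ⟨hy, by simp [hy]⟩, pvLoopA_both es ee xs _ _ (by split <;> omega) (by simp [hy])]
      simp [hy]
    · rw [if_neg (by rintro ⟨hc, _⟩; exact hy hc)]
      have e2 : (if x = ee then 0 + 1 else 0) = 0 := by simp [hy]
      rw [e2, ih (if x = es then cs + 1 else cs) (by split <;> omega)]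
      simp [hy]

-- End tag already seen, start tag not: the loop erases the first occurrence of the start tag.
theorem pvLoopA_ce (es ee : String) : ∀ (xs : List String) (ce : Nat), 1 ≤ ce → pvLoopA es ee xs 0 ce = xs.erase es := by
  intro xs
  induction xs with
  | nil => intro ce _; rfl
  | cons x xs ih =>
    intro ce hce
    simp only [pvLoopA]
    by_cases hx : x = es
    · rw [if_pos ⟨hx, by simp [hx]⟩, pvLoopA_both es ee xs _ _ (by simp [hx]) (by split <;> omega)]
      simp [hx]
    · rw [if_neg (by rintro ⟨hc, _⟩; exact hx hc)]
      have h2 : ¬(x = ee ∧ (if x = ee then ce + 1 else ce) = 1) := by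
        rintro ⟨rfl, h⟩; simp at h; omega
      rw [if_neg h2]
      have e1 : (if x = es then 0 + 1 else 0) = 0 := by simp [hx]
      rw [e1, ih (if x = ee then ce + 1 else ce) (by split <;> omega)]
      simp [hx]

-- The whole loop removes the first occurrence of each tag (once only when they coincide).
theorem pvLoopA_main (es ee : String) (xs : List String) :
    pvLoopA es ee xs 0 0 = if ee = es then xs.erase es else (xs.erase es).erase ee := by
  induction xs with
  | nil => by_cases h : ee = es <;> simp [pvLoopA, h]
  | cons x xs ih =>
    simp only [pvLoopA]
    by_cases hx : x = es
    · rw [if_pos ⟨hx, by simp [hx]⟩]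
      have e1 : (if x = es then 0 + 1 else 0) = 1 := by simp [hx]
      by_cases h : ee = es
      · have e2 : (if x = ee then 0 + 1 else 0) = 1 := by simp [hx, h]
        rw [e1, e2, pvLoopA_both es ee xs 1 1 (by omega) (by omega), if_pos h]
        simp [hx]
      · have e2 : (if x = ee then 0 + 1 else 0) = 0 := by
          simp [hx]; exact fun hc => h hc.symm
        rw [e1, e2, pvLoopA_cs es ee xs 1 (by omega), if_neg h]
        simp [hx]
    · rw [if_neg (by rintro ⟨hc, _⟩; exact hx hc)]
      have e1 : (if x = es then 0 + 1 else 0) = 0 := by simp [hx]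
      by_cases hy : x = ee
      · rw [if_pos ⟨hy, by simp [hy]⟩]
        have e2 : (if x = ee then 0 + 1 else 0) = 1 := by simp [hy]
        have h : ¬ ee = es := by rintro rfl; exact hx hy
        rw [e1, e2, pvLoopA_ce es ee xs 1 (by omega), if_neg h]
        simp [hy, h]
      · rw [if_neg (by rintro ⟨hc, _⟩; exact hy hc)]
        have e2 : (if x = ee then 0 + 1 else 0) = 0 := by simp [hy]
        rw [e1, e2, ih]
        by_cases h : ee = es <;> simp [h, hx, hy]

-- ===== VERDICT (by name: the statement is the Claim_ definition above) =====
theorem get_entity_start_and_end_spec : Claim_equal_get_entity_start_and_end := by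
  intro es ee tokens _ hpre
  obtain ⟨hs, he⟩ := hpre
  unfold Spec_get_entity_start_and_end get_entity_start_and_end get_entity_start_and_end_alt
  obtain ⟨i, hi⟩ := Option.isSome_iff_exists.1 ((PySem.List.index?_isSome_iff tokens es).2 hs)
  obtain ⟨j, hj⟩ := Option.isSome_iff_exists.1 ((PySem.List.index?_isSome_iff tokens ee).2 he)
  simp only [hi, hj, PySem.List.remove?_eq_some_erase tokens es hs, pvLoopA_main]
  by_cases h : ee = es
  · simp [h]
  · simp [h, PySem.List.remove?_eq_some_erase (tokens.erase es) ee ((List.mem_erase_of_ne h).2 he)]
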